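-- pv_equiv track=rewrite | github.com/zolydiac/Advanced-ML-Enhanced-Test-Failure-Prediction-Framework | validation_visualizations.py | _get_feature_category
-- ===== SOURCE A (Python) =====
-- def _get_feature_category(feature):
--     """Get the category for a single feature."""
--     feature_lower = feature.lower()
--
--     if any(keyword in feature_lower for keyword in ['day', 'hour', 'weekend', 'time']):
--         return 'Temporal'
--     elif any(keyword in feature_lower for keyword in ['commit', 'change', 'author']):
--         return 'Code Changes'
--     elif any(keyword in feature_lower for keyword in ['complexity', 'assertion', 'xpath']):
--         return 'Test Complexity'
--     elif any(keyword in feature_lower for keyword in ['failure_rate', 'flakiness', 'previous']):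
--         return 'Historical'
--     elif any(keyword in feature_lower for keyword in ['parallel', 'dependency', 'maintenance']):
--         return 'Environmental'
--     else:
--         return 'Other'
-- ===== SOURCE B (Python) =====
-- _KEYWORD_PRIORITY = {
--     'day': 0, 'hour': 0, 'weekend': 0, 'time': 0,
--     'commit': 1, 'change': 1, 'author': 1,
--     'complexity': 2, 'assertion': 2, 'xpath': 2,
--     'failure_rate': 3, 'flakiness': 3, 'previous': 3,
--     'parallel': 4, 'dependency': 4, 'maintenance': 4,
-- }
--
-- _CATEGORIES = ['Temporal', 'Code Changes', 'Test Complexity',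
--                'Historical', 'Environmental', 'Other']
--
--
-- def _get_feature_category(feature):
--     """Single left-to-right scan over the string: at each position, any keyword
--     starting there lowers the running best (minimum) priority; the answer is
--     the category of the best priority found ('Other' if none)."""
--     s = feature.lower()
--     best = len(_CATEGORIES) - 1  # 'Other' until a keyword occurrence is found
--     for i in range(len(s)):
--         for kw, p in _KEYWORD_PRIORITY.items():
--             if p < best and s.startswith(kw, i):
--                 best = p
--     return _CATEGORIES[best]
-- ===== Notes on version B (the rewrite author's own statement) =====
-- stated objective: alternative
-- what changed: Replaces A's category-grouped if/elif substring-containment chain with a single left-to-right scan over the string positions that matches a flat keyword-to-priority map via startswith and keeps a running minimum priority, finally indexing a category list; it trades A's built-in containment tests for an explicit scan, so it is not faster.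
import Mathlib
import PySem

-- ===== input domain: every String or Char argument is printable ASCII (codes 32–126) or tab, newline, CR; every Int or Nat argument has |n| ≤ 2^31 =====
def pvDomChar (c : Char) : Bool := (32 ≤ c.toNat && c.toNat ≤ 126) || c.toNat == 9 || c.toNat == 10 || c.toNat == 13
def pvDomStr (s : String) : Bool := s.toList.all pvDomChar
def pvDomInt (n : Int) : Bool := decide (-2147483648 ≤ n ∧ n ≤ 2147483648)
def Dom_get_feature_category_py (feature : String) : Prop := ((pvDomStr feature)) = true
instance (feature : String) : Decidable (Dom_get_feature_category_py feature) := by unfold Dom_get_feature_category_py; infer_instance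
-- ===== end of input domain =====

-- B replaces A's category-grouped if/elif containment chain by a single left-to-right scan over the
-- string's positions with a flat keyword→priority map and a running-minimum accumulator (alternative; it trades
-- A's built-in substring tests for an explicit position scan, so it is not faster).


-- ===== PORT A =====
def get_feature_category_py (feature : String) : String :=
  let feature_lower := PySem.Str.lower feature
  if ["day", "hour", "weekend", "time"].any (fun keyword => PySem.Str.isIn keyword feature_lower) then
    "Temporal"
  else if ["commit", "change", "author"].any (fun keyword => PySem.Str.isIn keyword feature_lower) then
    "Code Changes"
  else if ["complexity", "assertion", "xpath"].any (fun keyword => PySem.Str.isIn keyword feature_lower) then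
    "Test Complexity"
  else if ["failure_rate", "flakiness", "previous"].any (fun keyword => PySem.Str.isIn keyword feature_lower) then
    "Historical"
  else if ["parallel", "dependency", "maintenance"].any (fun keyword => PySem.Str.isIn keyword feature_lower) then
    "Environmental"
  else
    "Other"

-- ===== PORT B =====
-- the dict _KEYWORD_PRIORITY of Source B (association list in insertion order; keywords as char lists)
def pvKeywordPriority : List (List Char × Nat) :=
  [("day".toList, 0), ("hour".toList, 0), ("weekend".toList, 0), ("time".toList, 0),
   ("commit".toList, 1), ("change".toList, 1), ("author".toList, 1),
   ("complexity".toList, 2), ("assertion".toList, 2), ("xpath".toList, 2),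
   ("failure_rate".toList, 3), ("flakiness".toList, 3), ("previous".toList, 3),
   ("parallel".toList, 4), ("dependency".toList, 4), ("maintenance".toList, 4)]

def pvCategories : List String :=
  ["Temporal", "Code Changes", "Test Complexity", "Historical", "Environmental", "Other"]

-- port of Source B: 'for i in range(len(s))' → fold over List.range s.length (exact: len(s) ≥ 0);
-- 's.startswith(kw, i)' with 0 ≤ i → kw is a prefix of s dropped at i (Chars.startswith, exact here);
-- '_CATEGORIES[best]' → getD (best ≤ 5 = len-1 is an invariant of the loop, so the index never raises)
def get_feature_category_py_alt (feature : String) : String :=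
  let s := PySem.Chars.lower feature.toList
  let best := (List.range s.length).foldl
    (fun best i => pvKeywordPriority.foldl
      (fun b kp => if kp.2 < b ∧ PySem.Chars.startswith (List.drop i s) kp.1 = true then kp.2 else b)
      best)
    (pvCategories.length - 1)
  pvCategories.getD best "Other"

-- ===== PRECONDITION & SPEC =====
def Spec_get_feature_category_py (feature : String) (out : String) : Prop := out = get_feature_category_py_alt feature
instance (feature : String) (out : String) : Decidable (Spec_get_feature_category_py feature out) := by unfold Spec_get_feature_category_py; infer_instance

-- ===== CLAIM (what is proved, stated in full; the proofs are below) =====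
def Claim_equal_get_feature_category_py : Prop := ∀ (feature : String), Dom_get_feature_category_py feature → Spec_get_feature_category_py feature (get_feature_category_py feature)

-- ===== LEMMAS AND PROOFS =====

-- generic characterization of the running-minimum-with-test fold
theorem pvFoldMin {α : Type} (q : α → Prop) [DecidablePred q] (f : α → Nat) (L : List α) (b : Nat) :
    ((L.foldl (fun b x => if f x < b ∧ q x then f x else b) b) = b ∨
      ∃ x ∈ L, q x ∧ f x = L.foldl (fun b x => if f x < b ∧ q x then f x else b) b) ∧
    (L.foldl (fun b x => if f x < b ∧ q x then f x else b) b) ≤ b ∧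
    (∀ x ∈ L, q x → (L.foldl (fun b x => if f x < b ∧ q x then f x else b) b) ≤ f x) := by
  induction L generalizing b with
  | nil => simp
  | cons y t ih =>
    simp only [List.foldl_cons, List.mem_cons]
    by_cases h : f y < b ∧ q y
    · rw [if_pos h]
      obtain ⟨m1, m2, m3⟩ := ih (f y)
      refine ⟨?_, ?_, ?_⟩
      · rcases m1 with h1 | h1
        · exact Or.inr ⟨y, Or.inl rfl, h.2, h1.symm⟩
        · obtain ⟨x, hx, hq, hf⟩ := h1; exact Or.inr ⟨x, Or.inr hx, hq, hf⟩
      · omega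
      · rintro x (rfl | hx) hq
        · omega
        · exact m3 x hx hq
    · rw [if_neg h]
      obtain ⟨m1, m2, m3⟩ := ih b
      refine ⟨m1.imp id (fun ⟨x, hx, hq, hf⟩ => ⟨x, Or.inr hx, hq, hf⟩), m2, ?_⟩
      rintro x (rfl | hx) hq
      · rcases Decidable.not_and_iff_or_not.mp h with h' | h'
        · omega
        · exact absurd hq h'
      · exact m3 x hx hq

-- flatten the nested loop into one fold over pairs
theorem pvFoldlFoldl {α β γ : Type} (g : α → γ → β → γ) (l : List α) (T : List β) (b : γ) :
    l.foldl (fun b i => T.foldl (g i) b) b =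
      (l.flatMap (fun i => T.map (Prod.mk i))).foldl (fun b x => g x.1 b x.2) b := by
  induction l generalizing b with
  | nil => rfl
  | cons y t ih =>
    simp only [List.foldl_cons, List.flatMap_cons, List.foldl_append, List.foldl_map, ih]

-- a nonempty keyword starts at some position of s iff it is a substring of s
theorem pvOccIff (s kw : List Char) (hkw : kw ≠ []) :
    (∃ i, i ∈ List.range s.length ∧ PySem.Chars.startswith (List.drop i s) kw = true) ↔
      PySem.Chars.isIn kw s = true := by
  rw [← PySem.Chars.exists_prefix_drop_iff_isIn]
  constructor
  · rintro ⟨i, _, h⟩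
    exact ⟨i, (PySem.Chars.startswith_iff _ _).mp h⟩
  · rintro ⟨j, h⟩
    refine ⟨j, List.mem_range.mpr ?_, (PySem.Chars.startswith_iff _ _).mpr h⟩
    by_contra hj
    rw [List.drop_eq_nil_of_le (by omega)] at h
    exact hkw (List.prefix_nil.mp h)
-- proof-only abbreviation for B's loop (definitionally the fold inside get_feature_category_py_alt)
def pvBest (s : List Char) : Nat :=
  (List.range s.length).foldl
    (fun best i => pvKeywordPriority.foldl
      (fun b kp => if kp.2 < b ∧ PySem.Chars.startswith (List.drop i s) kp.1 = true then kp.2 else b)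
      best)
    5

-- 'priority p is realized by a keyword occurring in s'
def pvM (s : List Char) (p : Nat) : Prop :=
  ∃ kp ∈ pvKeywordPriority, kp.2 = p ∧ PySem.Chars.isIn kp.1 s = true

theorem pvM_le4 (s : List Char) (p : Nat) : pvM s p → p ≤ 4 := by
  rintro ⟨kp, hkp, rfl, -⟩
  fin_cases hkp <;> simp

theorem pvBest_spec (s : List Char) :
    (pvBest s = 5 ∨ pvM s (pvBest s)) ∧ pvBest s ≤ 5 ∧ (∀ p, pvM s p → pvBest s ≤ p) := by
  unfold pvBest
  have hfl := pvFoldlFoldl (fun i b (kp : List Char × Nat) => if kp.2 < b ∧ PySem.Chars.startswith (List.drop i s) kp.1 = true then kp.2 else b) (List.range s.length) pvKeywordPriority 5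
  rw [hfl]
  obtain ⟨m1, m2, m3⟩ := pvFoldMin (fun x : Nat × (List Char × Nat) => PySem.Chars.startswith (List.drop x.1 s) x.2.1 = true) (fun x => x.2.2)
    ((List.range s.length).flatMap (fun i => pvKeywordPriority.map (Prod.mk i))) 5
  have hne : ∀ kp ∈ pvKeywordPriority, kp.1 ≠ [] := by decide
  refine ⟨?_, m2, ?_⟩
  · rcases m1 with h | ⟨x, hx, hq, hf⟩
    · exact Or.inl h
    · refine Or.inr ⟨x.2, ?_, hf, ?_⟩
      · obtain ⟨i, _, hmem⟩ := List.mem_flatMap.mp hx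
        obtain ⟨kp, hkp, hx2⟩ := List.mem_map.mp hmem
        cases hx2; exact hkp
      · obtain ⟨i, hi, hmem⟩ := List.mem_flatMap.mp hx
        obtain ⟨kp, hkp, hx2⟩ := List.mem_map.mp hmem
        cases hx2
        exact (pvOccIff s kp.1 (hne kp hkp)).mp ⟨i, hi, hq⟩
  · rintro p ⟨kp, hkp, hp, hin⟩
    obtain ⟨i, hi, hsw⟩ := (pvOccIff s kp.1 (hne kp hkp)).mpr hin
    have hx : (i, kp) ∈ (List.range s.length).flatMap (fun i => pvKeywordPriority.map (Prod.mk i)) :=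
      List.mem_flatMap.mpr ⟨i, hi, List.mem_map.mpr ⟨kp, hkp, rfl⟩⟩
    subst hp
    exact m3 (i, kp) hx hsw

theorem pvM0_iff (s : List Char) : pvM s 0 ↔ (PySem.Chars.isIn "day".toList s = true ∨ (PySem.Chars.isIn "hour".toList s = true ∨ (PySem.Chars.isIn "weekend".toList s = true ∨ PySem.Chars.isIn "time".toList s = true))) := by
  simp [pvM, pvKeywordPriority]

theorem pvM1_iff (s : List Char) : pvM s 1 ↔ (PySem.Chars.isIn "commit".toList s = true ∨ (PySem.Chars.isIn "change".toList s = true ∨ PySem.Chars.isIn "author".toList s = true)) := by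
  simp [pvM, pvKeywordPriority]

theorem pvM2_iff (s : List Char) : pvM s 2 ↔ (PySem.Chars.isIn "complexity".toList s = true ∨ (PySem.Chars.isIn "assertion".toList s = true ∨ PySem.Chars.isIn "xpath".toList s = true)) := by
  simp [pvM, pvKeywordPriority]

theorem pvM3_iff (s : List Char) : pvM s 3 ↔ (PySem.Chars.isIn "failure_rate".toList s = true ∨ (PySem.Chars.isIn "flakiness".toList s = true ∨ PySem.Chars.isIn "previous".toList s = true)) := by
  simp [pvM, pvKeywordPriority]

theorem pvM4_iff (s : List Char) : pvM s 4 ↔ (PySem.Chars.isIn "parallel".toList s = true ∨ (PySem.Chars.isIn "dependency".toList s = true ∨ PySem.Chars.isIn "maintenance".toList s = true)) := by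
  simp [pvM, pvKeywordPriority]

-- ===== VERDICT (by name: the statement is the Claim_ definition above) =====
theorem get_feature_category_py_spec : Claim_equal_get_feature_category_py := by
  intro feature _
  unfold Spec_get_feature_category_py
  have halt : get_feature_category_py_alt feature =
      pvCategories.getD (pvBest (PySem.Chars.lower feature.toList)) "Other" := rfl
  rw [halt]
  unfold get_feature_category_py
  simp only [PySem.Str.isIn_eq, PySem.Str.toList_lower, List.any_cons, List.any_nil,
    Bool.or_false, Bool.or_eq_true]
  set s := PySem.Chars.lower feature.toList with hs
  obtain ⟨hm, hle, hmin⟩ := pvBest_spec s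
  split_ifs with h0 h1 h2 h3 h4
  · have h := hmin 0 ((pvM0_iff s).mpr h0)
    rw [show pvBest s = 0 by omega]; rfl
  · have hn0 : pvBest s ≠ 0 := fun he => h0 ((pvM0_iff s).mp (by rcases hm with h | h; omega; exact he ▸ h))
    have h := hmin 1 ((pvM1_iff s).mpr h1)
    rw [show pvBest s = 1 by omega]; rfl
  · have hn0 : pvBest s ≠ 0 := fun he => h0 ((pvM0_iff s).mp (by rcases hm with h | h; omega; exact he ▸ h))
    have hn1 : pvBest s ≠ 1 := fun he => h1 ((pvM1_iff s).mp (by rcases hm with h | h; omega; exact he ▸ h))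
    have h := hmin 2 ((pvM2_iff s).mpr h2)
    rw [show pvBest s = 2 by omega]; rfl
  · have hn0 : pvBest s ≠ 0 := fun he => h0 ((pvM0_iff s).mp (by rcases hm with h | h; omega; exact he ▸ h))
    have hn1 : pvBest s ≠ 1 := fun he => h1 ((pvM1_iff s).mp (by rcases hm with h | h; omega; exact he ▸ h))
    have hn2 : pvBest s ≠ 2 := fun he => h2 ((pvM2_iff s).mp (by rcases hm with h | h; omega; exact he ▸ h))
    have h := hmin 3 ((pvM3_iff s).mpr h3)
    rw [show pvBest s = 3 by omega]; rfl
  · have hn0 : pvBest s ≠ 0 := fun he => h0 ((pvM0_iff s).mp (by rcases hm with h | h; omega; exact he ▸ h))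
    have hn1 : pvBest s ≠ 1 := fun he => h1 ((pvM1_iff s).mp (by rcases hm with h | h; omega; exact he ▸ h))
    have hn2 : pvBest s ≠ 2 := fun he => h2 ((pvM2_iff s).mp (by rcases hm with h | h; omega; exact he ▸ h))
    have hn3 : pvBest s ≠ 3 := fun he => h3 ((pvM3_iff s).mp (by rcases hm with h | h; omega; exact he ▸ h))
    have h := hmin 4 ((pvM4_iff s).mpr h4)
    rw [show pvBest s = 4 by omega]; rfl
  · have hn0 : pvBest s ≠ 0 := fun he => h0 ((pvM0_iff s).mp (by rcases hm with h | h; omega; exact he ▸ h))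
    have hn1 : pvBest s ≠ 1 := fun he => h1 ((pvM1_iff s).mp (by rcases hm with h | h; omega; exact he ▸ h))
    have hn2 : pvBest s ≠ 2 := fun he => h2 ((pvM2_iff s).mp (by rcases hm with h | h; omega; exact he ▸ h))
    have hn3 : pvBest s ≠ 3 := fun he => h3 ((pvM3_iff s).mp (by rcases hm with h | h; omega; exact he ▸ h))
    have hn4 : pvBest s ≠ 4 := fun he => h4 ((pvM4_iff s).mp (by rcases hm with h | h; omega; exact he ▸ h))
    have hle4 : pvBest s = 5 := by
      rcases hm with h | h
      · exact h
      · have := pvM_le4 s _ h; omega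
    rw [hle4]; rfl
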